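-- pv_equiv track=rewrite | github.com/Yael-Weiss/FinalProject | triangles_funcs.py | is_loc_in_upper_right_tri
-- ===== SOURCE A (Python) =====
-- from typing import List, Tuple
--
-- Coordinates = Tuple[int, int]
--
-- def is_loc_in_upper_right_tri(loc: Coordinates) -> bool:
--     start_col = 18
--     places_to_fill = 4
--     start_row = 4
--     while (start_row != 9):
--         for i in range(places_to_fill):
--             if (start_row == loc[0] and (start_col+2*i) == loc[1]):
--                 return True
--         start_col += 1
--         start_row += 1
--         places_to_fill -= 1
--     return False
-- ===== SOURCE B (Python) =====
-- def is_loc_in_upper_right_tri(loc):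
--     r, c = loc[0], loc[1]
--     if not (4 <= r <= 7):
--         return False
--     d = c - (14 + r)
--     return d >= 0 and d % 2 == 0 and d // 2 < 8 - r
-- ===== Notes on version B (the rewrite author's own statement) =====
-- stated objective: simpler
-- what changed: Replaces the row-by-row while loop with an inner range scan by a direct arithmetic membership test (row bound, even offset from the row's start column, per-row count).
import Mathlib
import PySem

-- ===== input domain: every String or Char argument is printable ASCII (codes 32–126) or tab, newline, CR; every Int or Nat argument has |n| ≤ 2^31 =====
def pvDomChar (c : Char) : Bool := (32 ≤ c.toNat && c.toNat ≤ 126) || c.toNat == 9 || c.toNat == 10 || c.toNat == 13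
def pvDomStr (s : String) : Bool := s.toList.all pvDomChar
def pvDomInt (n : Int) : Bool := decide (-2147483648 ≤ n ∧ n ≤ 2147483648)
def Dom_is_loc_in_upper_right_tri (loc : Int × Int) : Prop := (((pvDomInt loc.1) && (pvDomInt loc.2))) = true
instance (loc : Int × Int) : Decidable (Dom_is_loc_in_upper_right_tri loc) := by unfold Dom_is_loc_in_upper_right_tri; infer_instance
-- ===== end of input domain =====

-- B replaces A's while loop over rows with a direct arithmetic membership test (simpler, same cost).


-- ===== PORT A =====
-- while loop of A, transliterated as a recursion on a fuel counter (the loop runs at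
-- most 5 iterations: start_row goes 4,5,6,7,8 then hits 9); each step scans range(places_to_fill)
def isLocLoopA (fuel : Nat) (start_col places_to_fill start_row : Int) (loc : Int × Int) : Bool :=
  match fuel with
  | 0 => false
  | n + 1 =>
    if start_row = 9 then false
    else if (PySem.List.pyRange 0 places_to_fill 1).any
        (fun i => decide (start_row = loc.1) && decide (start_col + 2 * i = loc.2)) then true
    else isLocLoopA n (start_col + 1) (places_to_fill - 1) (start_row + 1) loc

def is_loc_in_upper_right_tri (loc : Int × Int) : Bool :=
  isLocLoopA 6 18 4 4 loc

-- ===== PORT B =====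
def is_loc_in_upper_right_tri_alt (loc : Int × Int) : Bool :=
  let r := loc.1
  let c := loc.2
  if ¬ (4 ≤ r ∧ r ≤ 7) then false
  else
    let d := c - (14 + r)
    decide (0 ≤ d) && decide (PySem.Int.mod d 2 = 0) && decide (PySem.Int.floordiv d 2 < 8 - r)

-- ===== PRECONDITION & SPEC =====
def Spec_is_loc_in_upper_right_tri (loc : Int × Int) (out : Bool) : Prop := out = is_loc_in_upper_right_tri_alt loc
instance (loc : Int × Int) (out : Bool) : Decidable (Spec_is_loc_in_upper_right_tri loc out) := by unfold Spec_is_loc_in_upper_right_tri; infer_instance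

-- ===== CLAIM (what is proved, stated in full; the proofs are below) =====
def Claim_equal_is_loc_in_upper_right_tri : Prop := ∀ (loc : Int × Int), Dom_is_loc_in_upper_right_tri loc → Spec_is_loc_in_upper_right_tri loc (is_loc_in_upper_right_tri loc)

-- ===== LEMMAS AND PROOFS =====

-- ===== VERDICT (by name: the statement is the Claim_ definition above) =====
theorem is_loc_in_upper_right_tri_spec : Claim_equal_is_loc_in_upper_right_tri := by
  intro ⟨r, c⟩ _
  unfold Spec_is_loc_in_upper_right_tri
  simp only [is_loc_in_upper_right_tri, isLocLoopA, is_loc_in_upper_right_tri_alt,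
    PySem.Int.mod_eq_emod_of_pos (b := 2) (by norm_num),
    PySem.Int.floordiv_eq_ediv_of_pos (b := 2) (by norm_num)]
  norm_num
  simp only [show PySem.List.pyRange 0 4 1 = [0,1,2,3] from by decide,
    show PySem.List.pyRange 0 3 1 = [0,1,2] from by decide,
    show PySem.List.pyRange 0 2 1 = [0,1] from by decide,
    show PySem.List.pyRange 0 1 1 = [0] from by decide,
    List.any_cons, List.any_nil]
  norm_num
  apply Bool.eq_iff_iff.mpr
  constructor <;> intro h <;> simp_all <;> omega
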